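-- pv_equiv track=rewrite | github.com/dinobby/Symbolic-MoE | recruit_agents.py | create_skill_rankings
-- ===== SOURCE A (Python) =====
-- def create_skill_rankings(all_agent_profiles, available_keywords):
--
--     # Create dictionary with skills as keys
--     skill_rankings = {}
--
--     for skill in available_keywords:
--         agent_scores = []
--         for agent, skills in all_agent_profiles.items():
--             if skill in skills:
--                 agent_scores.append((agent, skills[skill]))
--
--         # Sort by score in descending order
--         agent_scores.sort(key=lambda x: x[1], reverse=True)
--
--         # Store only the agent names in order
--         skill_rankings[skill] = [(agent, score) for agent, score in agent_scores]
--
--     return skill_rankings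
-- ===== SOURCE B (Python) =====
-- def create_skill_rankings(all_agent_profiles, available_keywords):
--     # One pass over the agents' skill entries into per-skill buckets, then sort each bucket.
--     wanted = set(available_keywords)
--     entries = [(skill, (agent, score))
--                for agent, skills in all_agent_profiles.items()
--                for skill, score in skills.items()
--                if skill in wanted]
--     buckets = {}
--     for skill, pair in entries:
--         buckets.setdefault(skill, []).append(pair)
--     return {skill: sorted(buckets.get(skill, []), key=lambda x: x[1], reverse=True)
--             for skill in available_keywords}
-- ===== Notes on version B (the rewrite author's own statement) =====
-- stated objective: faster
-- what changed: Instead of rescanning every agent's skill dict once per requested keyword, B makes a single pass over all agents' skill entries, grouping the entries of requested skills into per-skill buckets, and then sorts each requested bucket once.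
import Mathlib
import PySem

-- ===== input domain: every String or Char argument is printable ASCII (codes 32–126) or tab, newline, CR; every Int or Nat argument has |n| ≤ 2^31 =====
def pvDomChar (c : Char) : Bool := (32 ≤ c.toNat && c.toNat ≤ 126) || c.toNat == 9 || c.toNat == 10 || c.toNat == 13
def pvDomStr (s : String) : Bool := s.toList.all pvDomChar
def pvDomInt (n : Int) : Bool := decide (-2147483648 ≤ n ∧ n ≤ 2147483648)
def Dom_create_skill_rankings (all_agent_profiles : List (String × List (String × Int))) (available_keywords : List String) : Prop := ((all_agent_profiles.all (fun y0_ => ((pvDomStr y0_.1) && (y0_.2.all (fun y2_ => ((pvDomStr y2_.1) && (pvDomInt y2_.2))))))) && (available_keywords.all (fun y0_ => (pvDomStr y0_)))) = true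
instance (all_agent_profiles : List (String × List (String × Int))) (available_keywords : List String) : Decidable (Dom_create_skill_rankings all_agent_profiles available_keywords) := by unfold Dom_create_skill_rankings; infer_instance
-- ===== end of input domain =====

-- B inverts A's loop nest: one pass over each agent's skill entries into per-skill buckets,
-- then one sort per requested keyword (objective: faster; A rescans all agents per keyword).


-- ===== PORT A =====
-- the dict parameters of the Python function are represented by building the corresponding
-- PySem.Dicts from the association lists (duplicate keys collapse exactly as dict(...) does)
def create_skill_rankings (all_agent_profiles : List (String × List (String × Int))) (available_keywords : List String) : List (String × List (String × Int)) :=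
  let profiles : PySem.Dict String (PySem.Dict String Int) :=
    PySem.Dict.ofList (all_agent_profiles.map (fun p => (p.1, PySem.Dict.ofList p.2)))
  let skill_rankings := available_keywords.foldl
    (fun (rk : PySem.Dict String (List (String × Int))) skill =>
      let agent_scores := profiles.items.foldl
        (fun acc ag => if ag.2.contains skill then acc ++ [(ag.1, ag.2.getD skill 0)] else acc) []
      let sortedScores := PySem.List.sorted agent_scores (fun x => x.2) true
      rk.insert skill (sortedScores.map (fun p => (p.1, p.2))))
    PySem.Dict.empty
  skill_rankings.items

-- ===== PORT B =====
def create_skill_rankings_alt (all_agent_profiles : List (String × List (String × Int))) (available_keywords : List String) : List (String × List (String × Int)) :=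
  let profiles : PySem.Dict String (PySem.Dict String Int) :=
    PySem.Dict.ofList (all_agent_profiles.map (fun p => (p.1, PySem.Dict.ofList p.2)))
  let wanted : PySem.Set String := PySem.Set.ofList available_keywords
  let entries : List (String × (String × Int)) := profiles.items.flatMap
    (fun ag => (ag.2.items.filter (fun sk => wanted.contains sk.1)).map
      (fun sk => (sk.1, (ag.1, sk.2))))
  let buckets : PySem.Dict String (List (String × Int)) := entries.foldl
    (fun d p => d.modify p.1 [] (fun l => l ++ [p.2])) PySem.Dict.empty
  (available_keywords.foldl
    (fun (rk : PySem.Dict String (List (String × Int))) skill =>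
      rk.insert skill (PySem.List.sorted (buckets.getD skill []) (fun x => x.2) true))
    PySem.Dict.empty).items

-- ===== PRECONDITION & SPEC =====
def Spec_create_skill_rankings (all_agent_profiles : List (String × List (String × Int))) (available_keywords : List String) (out : List (String × List (String × Int))) : Prop := out = create_skill_rankings_alt all_agent_profiles available_keywords
instance (all_agent_profiles : List (String × List (String × Int))) (available_keywords : List String) (out : List (String × List (String × Int))) : Decidable (Spec_create_skill_rankings all_agent_profiles available_keywords out) := by unfold Spec_create_skill_rankings; infer_instance

-- ===== CLAIM (what is proved, stated in full; the proofs are below) =====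
def Claim_equal_create_skill_rankings : Prop := ∀ (all_agent_profiles : List (String × List (String × Int))) (available_keywords : List String), Dom_create_skill_rankings all_agent_profiles available_keywords → Spec_create_skill_rankings all_agent_profiles available_keywords (create_skill_rankings all_agent_profiles available_keywords)

-- ===== LEMMAS AND PROOFS =====

-- a filter-then-map loop is the flatMap of per-element singletons
theorem pv_filter_map_eq_flatMap {α β : Type} (p : α → Bool) (f : α → β) (l : List α) :
    (l.filter p).map f = l.flatMap (fun x => if p x then [f x] else []) := by
  induction l with
  | nil => rfl
  | cons a t ih =>
    by_cases h : p a = true <;> simp [List.flatMap_cons, h, ih]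

-- under unique keys, filtering a dict's items at one key is exactly the lookup
theorem pv_items_filter_key {ν : Type} (d : PySem.Dict String ν) (s : String)
    (hnd : d.keys.Nodup) :
    d.items.filter (fun sk => sk.1 == s) =
      (match d.get? s with | some v => [(s, v)] | none => []) := by
  rcases d with ⟨l⟩
  induction l with
  | nil => simp [PySem.Dict.get?]
  | cons a t ih =>
    obtain ⟨k, v⟩ := a
    have hk : (PySem.Dict.mk ((k, v) :: t)).keys = k :: (PySem.Dict.mk t).keys := rfl
    rw [hk] at hnd
    have hnd' := hnd.of_cons
    have hna : k ∉ (PySem.Dict.mk t).keys := (List.nodup_cons.mp hnd).1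
    by_cases h : k = s
    · subst h
      have hfilt : t.filter (fun sk => sk.1 == k) = [] := by
        rw [List.filter_eq_nil_iff]
        intro x hx hbeq
        have hx1 : x.1 = k := by simpa using hbeq
        exact hna (hx1 ▸ List.mem_map_of_mem hx)
      show List.filter (fun sk => sk.1 == k) ((k, v) :: t) = _
      rw [PySem.Dict.get?_mk_cons]
      simp [hfilt]
    · have hb : (k == s) = false := by simp [h]
      show List.filter (fun sk => sk.1 == s) ((k, v) :: t) = _
      rw [PySem.Dict.get?_mk_cons, hb]
      simpa [List.filter_cons, hb] using ih hnd'

-- every value stored in (ofList L) is one of the values of L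
theorem pv_values_foldl_insert {κ ν : Type} [BEq κ] [LawfulBEq κ]
    (P : ν → Prop) (L : List (κ × ν)) (d : PySem.Dict κ ν)
    (hd : ∀ p ∈ d.items, P p.2) (hL : ∀ q ∈ L, P q.2) :
    ∀ p ∈ (L.foldl (fun d q => d.insert q.1 q.2) d).items, P p.2 := by
  induction L generalizing d with
  | nil => simpa using hd
  | cons a t ih =>
    intro p hp
    refine ih (d.insert a.1 a.2) ?_ (fun q hq => hL q (List.mem_cons_of_mem _ hq)) p hp
    intro q hq
    rcases (PySem.Dict.mem_items_insert d a.1 a.2 q).mp hq with h | ⟨h, _⟩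
    · subst h; exact hL a (List.mem_cons_self ..)
    · exact hd q h

theorem pv_nodup_values (all_agent_profiles : List (String × List (String × Int))) :
    ∀ ag ∈ (PySem.Dict.ofList (all_agent_profiles.map (fun p => (p.1, (PySem.Dict.ofList p.2 : PySem.Dict String Int))))).items,
      ag.2.keys.Nodup := by
  intro ag hag
  refine pv_values_foldl_insert (fun v => v.keys.Nodup)
    (all_agent_profiles.map (fun p => (p.1, (PySem.Dict.ofList p.2 : PySem.Dict String Int))))
    PySem.Dict.empty ?_ ?_ ag ?_
  · intro p hp
    simp [PySem.Dict.empty] at hp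
  · intro q hq
    rcases List.mem_map.mp hq with ⟨p, _, rfl⟩
    exact PySem.Dict.nodup_keys_ofList p.2
  · exact hag

-- the per-keyword list A builds equals the bucket B builds, for requested keywords
theorem pv_scores_eq (all_agent_profiles : List (String × List (String × Int)))
    (available_keywords : List String) (s : String) (hs : s ∈ available_keywords) :
    (PySem.Dict.ofList (all_agent_profiles.map (fun p => (p.1, (PySem.Dict.ofList p.2 : PySem.Dict String Int))))).items.foldl
        (fun acc ag => if ag.2.contains s then acc ++ [(ag.1, ag.2.getD s 0)] else acc) [] =
      (((PySem.Dict.ofList (all_agent_profiles.map (fun p => (p.1, (PySem.Dict.ofList p.2 : PySem.Dict String Int))))).items.flatMap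
          (fun ag => (ag.2.items.filter (fun sk => (PySem.Set.ofList available_keywords).contains sk.1)).map
            (fun sk => (sk.1, (ag.1, sk.2))))).foldl
        (fun d p => d.modify p.1 [] (fun l => l ++ [p.2])) PySem.Dict.empty).getD s [] := by
  rw [PySem.Dict.getD_foldl_modify_append, PySem.Dict.getD_empty,
      PySem.List.foldl_append_if, List.nil_append, List.nil_append,
      pv_filter_map_eq_flatMap, List.filter_flatMap, List.map_flatMap]
  apply List.flatMap_congr
  intro ag hag
  have hnd : ag.2.keys.Nodup := pv_nodup_values all_agent_profiles ag hag
  rw [List.filter_map, List.filter_filter, List.map_map]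
  simp only [Function.comp]
  have hfc : ∀ x ∈ ag.2.items,
      (x.1 == s && (PySem.Set.ofList available_keywords).contains x.1) = (x.1 == s) := by
    intro x _
    by_cases hx : x.1 = s
    · simp [hx, hs, PySem.Set.mem_ofList]
    · simp [hx]
  rw [List.filter_congr hfc, pv_items_filter_key ag.2 s hnd]
  rw [PySem.Dict.contains_eq_isSome_get?, PySem.Dict.getD_eq_get?_getD]
  cases hgs : ag.2.get? s with
  | none => simp
  | some v => simp

-- ===== VERDICT (by name: the statement is the Claim_ definition above) =====
theorem create_skill_rankings_spec : Claim_equal_create_skill_rankings := by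
  intro ps kws _
  unfold Spec_create_skill_rankings create_skill_rankings create_skill_rankings_alt
  simp only []
  congr 1
  apply PySem.List.foldl_congr_mem
  intro rk s hs
  rw [pv_scores_eq ps kws s hs]
  congr 1
  have : ∀ (l : List (String × Int)), l.map (fun p => (p.1, p.2)) = l := by
    intro l; simp
  rw [this]
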